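-- pv_equiv track=rewrite | github.com/KainoaGardner/MahjongWait-PointCalc | hands.py | splitSuits
-- ===== SOURCE A (Python) =====
-- def splitSuits(list):
--     manzu = []
--     pinzu = []
--     souzu = []
--     honor = []
--     for tile in list:
--         if tile not in ["AM5", "AP5", "AS5"]:
--             match tile[0]:
--                 case "M":
--                     manzu.append(tile)
--                 case "P":
--                     pinzu.append(tile)
--                 case "S":
--                     souzu.append(tile)
--                 case "H":
--                     honor.append(tile)
--         elif tile in ["AM5", "AP5", "AS5"]:
--             match tile[1]:
--                 case "M":
--                     manzu.append(tile)
--                 case "P":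
--                     pinzu.append(tile)
--                 case "S":
--                     souzu.append(tile)
--     return [manzu,pinzu,souzu,honor]
-- ===== SOURCE B (Python) =====
-- def splitSuits(list):
--     special = ("AM5", "AP5", "AS5")
--
--     def suit(tile):
--         return tile[1] if tile in special else tile[0]
--
--     return [[tile for tile in list if suit(tile) == c] for c in "MPSH"]
-- ===== Notes on version B (the rewrite author's own statement) =====
-- stated objective: simpler
-- what changed: Replaces the single-pass four-accumulator branching dispatch with a suit-character helper and four independent filtering passes (one comprehension per suit).
import Mathlib
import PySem

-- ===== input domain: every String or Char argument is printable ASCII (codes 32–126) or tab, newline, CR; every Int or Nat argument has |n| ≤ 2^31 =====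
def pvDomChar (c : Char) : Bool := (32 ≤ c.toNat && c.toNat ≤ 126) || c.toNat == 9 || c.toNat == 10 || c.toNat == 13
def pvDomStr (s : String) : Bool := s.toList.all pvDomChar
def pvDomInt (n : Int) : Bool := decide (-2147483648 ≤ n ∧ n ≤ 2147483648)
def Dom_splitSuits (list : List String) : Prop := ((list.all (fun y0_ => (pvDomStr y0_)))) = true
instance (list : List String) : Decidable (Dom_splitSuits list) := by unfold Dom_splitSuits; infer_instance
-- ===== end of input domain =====

-- B replaces A's single-pass four-accumulator dispatch by a suit-character helper and
-- four independent filtering passes; same O(n) cost, simpler decomposition.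

-- ===== PORT A =====
-- one step of A's loop: the four accumulators, the membership test, the match in branch order
-- (Python's 'match' on tile[0]/tile[1] is written as the equivalent ordered character comparison chain;
--  the 'none' arm is where Python raises IndexError on an empty tile — excluded by Pre_)
def splitSuitsStep (acc : List String × List String × List String × List String)
    (tile : String) : List String × List String × List String × List String :=
  let (m, p, s, h) := acc
  if tile ∉ ["AM5", "AP5", "AS5"] then
    match PySem.Str.pyGet? tile 0 with
    | some c =>
        if c = 'M' then (m ++ [tile], p, s, h)
        else if c = 'P' then (m, p ++ [tile], s, h)
        else if c = 'S' then (m, p, s ++ [tile], h)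
        else if c = 'H' then (m, p, s, h ++ [tile])
        else (m, p, s, h)
    | none => (m, p, s, h)   -- IndexError in Python: outside Pre_
  else
    match PySem.Str.pyGet? tile 1 with
    | some c =>
        if c = 'M' then (m ++ [tile], p, s, h)
        else if c = 'P' then (m, p ++ [tile], s, h)
        else if c = 'S' then (m, p, s ++ [tile], h)
        else (m, p, s, h)
    | none => (m, p, s, h)   -- unreachable: the three special tiles have length 3

def splitSuits (list : List String) : List (List String) :=
  let r := list.foldl splitSuitsStep ([], [], [], [])
  [r.1, r.2.1, r.2.2.1, r.2.2.2]

-- ===== PORT B =====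
-- the suit character of a tile: tile[1] for the three red-five tiles, else tile[0]
def suitChar? (tile : String) : Option Char :=
  if tile ∈ ["AM5", "AP5", "AS5"] then PySem.Str.pyGet? tile 1 else PySem.Str.pyGet? tile 0

def splitSuits_alt (list : List String) : List (List String) :=
  "MPSH".toList.map (fun c => list.filter (fun tile => suitChar? tile == some c))

-- ===== PRECONDITION & SPEC =====
-- Pre_ excludes lists containing an empty-string tile, on which Python A raises IndexError (tile[0]).
def Pre_splitSuits (list : List String) : Prop := ∀ t ∈ list, t ≠ ""
instance (list : List String) : Decidable (Pre_splitSuits list) := by unfold Pre_splitSuits; infer_instance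
def pvWitness_splitSuits : List String := ["M1", "AM5", "H3", "P2", "AS5", "S9"]
def Spec_splitSuits (list : List String) (out : List (List String)) : Prop := out = splitSuits_alt list
instance (list : List String) (out : List (List String)) : Decidable (Spec_splitSuits list out) := by unfold Spec_splitSuits; infer_instance

-- ===== CLAIM (what is proved, stated in full; the proofs are below) =====
def Claim_equal_splitSuits : Prop := ∀ (list : List String), Dom_splitSuits list → Pre_splitSuits list → Spec_splitSuits list (splitSuits list)

-- ===== LEMMAS AND PROOFS =====

-- what A's step does to each accumulator, expressed through B's suit character
theorem splitSuitsStep_eq (m p s h : List String) (t : String) (ht : t ≠ "") :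
    splitSuitsStep (m, p, s, h) t =
      (m ++ (if suitChar? t == some 'M' then [t] else []),
       p ++ (if suitChar? t == some 'P' then [t] else []),
       s ++ (if suitChar? t == some 'S' then [t] else []),
       h ++ (if suitChar? t == some 'H' then [t] else [])) := by
  by_cases hmem : t ∈ ["AM5", "AP5", "AS5"]
  · simp only [List.mem_cons, List.not_mem_nil, or_false] at hmem
    rcases hmem with rfl | rfl | rfl <;> simp [splitSuitsStep, suitChar?]
  · have hc : ∃ c, PySem.Str.pyGet? t 0 = some c := by
      have : t.toList ≠ [] := by
        simpa [String.toList_eq_nil_iff] using ht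
      rcases List.exists_cons_of_ne_nil this with ⟨c, cs, hcs⟩
      exact ⟨c, by simp [PySem.Str.pyGet?, PySem.Chars.pyGet?, hcs]⟩
    rcases hc with ⟨c, hc⟩
    simp only [splitSuitsStep, suitChar?, hmem, if_neg, if_true, not_false_iff, hc]
    by_cases h1 : c = 'M' <;> by_cases h2 : c = 'P' <;> by_cases h3 : c = 'S'
      <;> by_cases h4 : c = 'H' <;> simp_all

theorem splitSuits_loop (l : List String) (m p s h : List String)
    (hl : ∀ t ∈ l, t ≠ "") :
    l.foldl splitSuitsStep (m, p, s, h) =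
      (m ++ l.filter (fun t => suitChar? t == some 'M'),
       p ++ l.filter (fun t => suitChar? t == some 'P'),
       s ++ l.filter (fun t => suitChar? t == some 'S'),
       h ++ l.filter (fun t => suitChar? t == some 'H')) := by
  induction l generalizing m p s h with
  | nil => simp
  | cons t l ih =>
    have ht : t ≠ "" := hl t (List.mem_cons_self ..)
    rw [List.foldl_cons, splitSuitsStep_eq m p s h t ht,
      ih _ _ _ _ (fun x hx => hl x (List.mem_cons_of_mem _ hx))]
    by_cases h1 : suitChar? t == some 'M' <;> by_cases h2 : suitChar? t == some 'P'
      <;> by_cases h3 : suitChar? t == some 'S' <;> by_cases h4 : suitChar? t == some 'H'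
      <;> simp_all

-- ===== VERDICT (by name: the statement is the Claim_ definition above) =====
theorem splitSuits_spec : Claim_equal_splitSuits := by
  intro list _ hpre
  unfold Spec_splitSuits splitSuits splitSuits_alt
  rw [splitSuits_loop list [] [] [] [] hpre]
  have hmpsh : "MPSH".toList = ['M', 'P', 'S', 'H'] := by decide
  simp [hmpsh]
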